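-- pv_equiv track=rewrite | github.com/1van101/Connect-Four-Game | utils/check_for_winner.py | ascending_diagonal
-- ===== SOURCE A (Python) =====
-- def cell_matches(matrix, row, col, pl_sign):
--     if col < 0 or row < 0:
--         return False
--     try:
--         if matrix[row][col] == pl_sign:
--             return True
--     except IndexError:
--         return False
--     return False
--
-- def ascending_diagonal(matrix, row, col, pl_sign, win_num):
--     matches = set()
--
--     for i in range(win_num):
--         if cell_matches(matrix, row - i, col + i, pl_sign):
--             matches.add((row - i, col + i))
--         else:
--             break
--
--     for i in range(win_num):
--         if cell_matches(matrix, row + i, col - i, pl_sign):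
--             matches.add((row + i, col - i))
--         else:
--             break
--
--     return len(matches) >= win_num
-- ===== SOURCE B (Python) =====
-- def cell_matches(matrix, row, col, pl_sign):
--     if col < 0 or row < 0:
--         return False
--     try:
--         if matrix[row][col] == pl_sign:
--             return True
--     except IndexError:
--         return False
--     return False
--
--
-- def ascending_diagonal(matrix, row, col, pl_sign, win_num):
--     # True iff some window of win_num consecutive cells on the ascending diagonal,
--     # all equal to pl_sign, contains the cell (row, col).
--     if win_num <= 0:
--         return True
--     if win_num > len(matrix):
--         # a fully matching window needs win_num distinct valid row indices
--         return False
--     for s in range(win_num):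
--         # window covers diagonal offsets s - win_num + 1 .. s (offset 0 = (row, col))
--         if all(cell_matches(matrix, row - (s - j), col + (s - j), pl_sign)
--                for j in range(win_num)):
--             return True
--     return False
-- ===== Notes on version B (the rewrite author's own statement) =====
-- stated objective: alternative
-- what changed: Replaces A's run-length counting from the center (two directional break-on-mismatch scans accumulating a set of coordinate tuples whose size is compared to win_num) by an existential sliding-window check: after pruning win_num > len(matrix) (a fully matching window needs win_num valid rows), B tests each window of win_num consecutive ascending-diagonal cells containing (row, col) and returns True iff some window matches entirely, with no set and no run bookkeeping.
import Mathlib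
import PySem

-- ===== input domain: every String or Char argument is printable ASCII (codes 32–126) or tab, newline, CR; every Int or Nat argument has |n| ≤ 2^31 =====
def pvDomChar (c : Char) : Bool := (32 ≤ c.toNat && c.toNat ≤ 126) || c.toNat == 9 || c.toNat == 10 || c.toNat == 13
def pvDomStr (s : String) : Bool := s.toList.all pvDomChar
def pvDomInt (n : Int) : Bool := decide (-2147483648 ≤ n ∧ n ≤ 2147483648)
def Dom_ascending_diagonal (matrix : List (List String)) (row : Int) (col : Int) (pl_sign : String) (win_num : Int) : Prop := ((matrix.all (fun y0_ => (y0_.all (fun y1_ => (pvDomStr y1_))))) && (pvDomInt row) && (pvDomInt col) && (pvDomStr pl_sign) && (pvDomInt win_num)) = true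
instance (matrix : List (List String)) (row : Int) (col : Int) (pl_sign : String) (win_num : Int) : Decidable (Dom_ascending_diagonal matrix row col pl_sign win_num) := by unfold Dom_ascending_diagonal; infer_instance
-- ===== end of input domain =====

-- B replaces A's run-length counting from the center (two directional scans into a set of
-- coordinates) by an existential sliding-window check over the win_num windows of win_num
-- consecutive diagonal cells containing (row, col).

-- ===== PORT A =====
-- helper cell_matches from the same module, shared by both Python versions
def cell_matches (matrix : List (List String)) (row : Int) (col : Int) (pl_sign : String) : Bool :=
  if col < 0 || row < 0 then false
  else
    match PySem.List.pyGet? matrix row with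
    | none => false                                   -- IndexError on matrix[row]
    | some r =>
      match PySem.List.pyGet? r col with
      | none => false                                 -- IndexError on matrix[row][col]
      | some c => c == pl_sign

-- one 'for i in range(win_num): if cell_matches(p(i)): matches.add(p(i)) else: break' loop,
-- i the Int loop counter, fuel = win_num.toNat the number of iterations range(win_num) yields
-- (lazy like Python's range: it stops at the break without visiting further indices)
def pvLoopA (matrix : List (List String)) (pl_sign : String) (f : Int → Int × Int) :
    Nat → Int → PySem.Set (Int × Int) → PySem.Set (Int × Int)
  | 0, _, s => s
  | fuel+1, i, s =>
    if cell_matches matrix (f i).1 (f i).2 pl_sign then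
      pvLoopA matrix pl_sign f fuel (i+1) (PySem.Set.add s (f i))
    else s

def ascending_diagonal (matrix : List (List String)) (row : Int) (col : Int) (pl_sign : String) (win_num : Int) : Bool :=
  let s1 := pvLoopA matrix pl_sign (fun i => (row - i, col + i)) win_num.toNat 0 PySem.Set.empty
  let s2 := pvLoopA matrix pl_sign (fun i => (row + i, col - i)) win_num.toNat 0 s1
  decide (PySem.Set.len s2 ≥ win_num)

-- ===== PORT B =====
-- 'if win_num > len(matrix): return False'; 'for s in range(win_num): if all(...): return True; return False' → any over range;
-- 'all(cell_matches(matrix, row - (s - j), col + (s - j), pl_sign) for j in range(win_num))' → all over range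
def ascending_diagonal_alt (matrix : List (List String)) (row : Int) (col : Int) (pl_sign : String) (win_num : Int) : Bool :=
  if win_num ≤ 0 then true
  else if (matrix.length : Int) < win_num then false   -- a matching window needs win_num valid rows
  else (List.range win_num.toNat).any (fun s =>
    (List.range win_num.toNat).all (fun j =>
      cell_matches matrix (row - ((s : Int) - (j : Int))) (col + ((s : Int) - (j : Int))) pl_sign))

-- ===== PRECONDITION & SPEC =====
def Spec_ascending_diagonal (matrix : List (List String)) (row : Int) (col : Int) (pl_sign : String) (win_num : Int) (out : Bool) : Prop := out = ascending_diagonal_alt matrix row col pl_sign win_num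
instance (matrix : List (List String)) (row : Int) (col : Int) (pl_sign : String) (win_num : Int) (out : Bool) : Decidable (Spec_ascending_diagonal matrix row col pl_sign win_num out) := by unfold Spec_ascending_diagonal; infer_instance

-- ===== CLAIM (what is proved, stated in full; the proofs are below) =====
def Claim_equal_ascending_diagonal : Prop := ∀ (matrix : List (List String)) (row : Int) (col : Int) (pl_sign : String) (win_num : Int), Dom_ascending_diagonal matrix row col pl_sign win_num → Spec_ascending_diagonal matrix row col pl_sign win_num (ascending_diagonal matrix row col pl_sign win_num)

-- ===== LEMMAS AND PROOFS =====

-- the coordinate visited at step k in direction (dr, dc), and whether it matches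
def pvPt (row col dr dc : Int) (k : Nat) : Int × Int := (row + dr * k, col + dc * k)
def pvQ (matrix : List (List String)) (row col dr dc : Int) (pl_sign : String) (j : Int) : Bool :=
  cell_matches matrix (row + dr * j) (col + dc * j) pl_sign
-- length of the initial matching run among steps 0 .. w-1
def pvRun (q : Nat → Bool) (w : Nat) : Nat := ((List.range w).takeWhile q).length

lemma pvLoopA_eq_foldl (matrix : List (List String)) (pl_sign : String) (f : Int → Int × Int) :
    ∀ (fuel : Nat) (i : Int) (s : PySem.Set (Int × Int)),
    pvLoopA matrix pl_sign f fuel i s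
      = (((List.range fuel).map (fun t : Nat => f (i + t))).takeWhile
          (fun p => cell_matches matrix p.1 p.2 pl_sign)).foldl PySem.Set.add s := by
  intro fuel
  induction fuel with
  | zero => intro i s; rfl
  | succ n ih =>
    intro i s
    rw [pvLoopA, List.range_succ_eq_map, List.map_cons, List.takeWhile_cons, List.map_map]
    have hsh : ((fun t : Nat => f (i + t)) ∘ Nat.succ) = fun t : Nat => f (i + 1 + t) := by
      funext t
      simp only [Function.comp_apply]
      congr 1
      push_cast
      ring
    rw [hsh]
    simp only [Nat.cast_zero, add_zero]
    by_cases h : cell_matches matrix (f i).1 (f i).2 pl_sign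
    · rw [if_pos h, if_pos h, List.foldl_cons, ih (i+1)]
    · rw [if_neg h, if_neg h]; rfl

lemma takeWhile_range_eq (q : Nat → Bool) (w : Nat) :
    (List.range w).takeWhile q = List.range (pvRun q w) := by
  have hle : ((List.range w).takeWhile q).length ≤ w := by
    simpa using (List.takeWhile_prefix q (l := List.range w)).length_le
  rw [pvRun]
  conv_lhs => rw [List.prefix_iff_eq_take.mp (List.takeWhile_prefix q)]
  rw [List.take_range]
  congr 1
  exact Nat.min_eq_left hle

lemma pvRun_le (q : Nat → Bool) (w : Nat) : pvRun q w ≤ w := by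
  have := (List.takeWhile_prefix q (l := List.range w)).length_le
  simpa [pvRun] using this

lemma pvRun_holds (q : Nat → Bool) (w : Nat) {k : Nat} (hk : k < pvRun q w) : q k = true := by
  have hmem : k ∈ (List.range w).takeWhile q := by
    rw [takeWhile_range_eq]; exact List.mem_range.mpr hk
  exact List.mem_takeWhile_imp hmem

lemma prefix_takeWhile {α : Type} (p : α → Bool) :
    ∀ (l₁ l : List α), l₁ <+: l → (∀ x ∈ l₁, p x = true) → l₁ <+: l.takeWhile p := by
  intro l₁
  induction l₁ with
  | nil => intro l _ _; exact List.nil_prefix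
  | cons a t ih =>
    intro l hpre hall
    obtain ⟨r, rfl⟩ := hpre
    rw [List.cons_append, List.takeWhile_cons, if_pos (hall a (by simp))]
    exact List.cons_prefix_cons.mpr ⟨rfl, ih (t ++ r) ⟨r, rfl⟩ (fun x hx => hall x (by simp [hx]))⟩

lemma pvRun_stop (q : Nat → Bool) (w : Nat) (h : pvRun q w < w) : q (pvRun q w) = false := by
  by_contra hq
  have hq' : q (pvRun q w) = true := by
    cases hqq : q (pvRun q w) with
    | true => rfl
    | false => exact absurd hqq hq
  have hpre : List.range (pvRun q w + 1) <+: (List.range w).takeWhile q := by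
    refine prefix_takeWhile q _ _ ?_ ?_
    · have heq : List.range (pvRun q w + 1) = (List.range w).take (pvRun q w + 1) := by
        rw [List.take_range, Nat.min_eq_left (by omega)]
      rw [heq]
      exact List.take_prefix _ _
    · intro x hx
      have hx' := List.mem_range.mp hx
      rcases Nat.lt_succ_iff_lt_or_eq.mp hx' with h1 | h1
      · exact pvRun_holds q w h1
      · rw [h1]; exact hq'
  have := hpre.length_le
  simp [pvRun] at this

lemma set_add_mem {x : Int × Int} {s : PySem.Set (Int × Int)} (h : x ∈ s) :
    PySem.Set.add s x = s := by
  simp [PySem.Set.add, PySem.Set.contains, h]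

lemma set_add_not_mem {x : Int × Int} {s : PySem.Set (Int × Int)} (h : ¬ x ∈ s) :
    PySem.Set.add s x = s ++ [x] := by
  simp [PySem.Set.add, PySem.Set.contains, h]

lemma set_foldl_add_disjoint : ∀ (l : List (Int × Int)) (s : PySem.Set (Int × Int)),
    l.Nodup → (∀ x ∈ l, x ∉ s) → l.foldl PySem.Set.add s = s ++ l := by
  intro l
  induction l with
  | nil => simp
  | cons a l ih =>
    intro s hnd hdis
    simp only [List.foldl_cons]
    rw [set_add_not_mem (hdis a (by simp))]
    rw [ih _ (List.Nodup.of_cons hnd) ?_]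
    · simp
    · intro x hx
      simp only [List.mem_append, List.mem_singleton]
      rintro (h | rfl)
      · exact hdis x (by simp [hx]) h
      · exact (List.nodup_cons.mp hnd).1 hx

lemma pvPt_inj (row col dr dc : Int) (h : dr = 1 ∨ dr = -1) :
    Function.Injective (pvPt row col dr dc) := by
  intro a b hab
  simp only [pvPt, Prod.mk.injEq] at hab
  rcases h with rfl | rfl <;> simp only [one_mul, neg_one_mul] at hab <;> omega

-- A's first/second loop produces exactly the first pvRun matching points of its direction
lemma loop_result (matrix : List (List String)) (row col dr dc : Int) (pl_sign : String)
    (win_num : Int) (s : PySem.Set (Int × Int)) (f : Int → Int × Int)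
    (hf : ∀ k : Nat, f ((0:Int) + k) = pvPt row col dr dc k) :
    pvLoopA matrix pl_sign f win_num.toNat 0 s
      = ((List.range (pvRun (fun k : Nat => pvQ matrix row col dr dc pl_sign k) win_num.toNat)).map
          (pvPt row col dr dc)).foldl PySem.Set.add s := by
  rw [pvLoopA_eq_foldl]
  have hmap : (List.range win_num.toNat).map (fun t : Nat => f ((0:Int) + t))
      = (List.range win_num.toNat).map (pvPt row col dr dc) :=
    List.map_congr_left (fun k _ => hf k)
  rw [hmap, List.takeWhile_map]
  have hcomp : ((fun p : Int × Int => cell_matches matrix p.1 p.2 pl_sign) ∘ pvPt row col dr dc)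
      = fun k : Nat => pvQ matrix row col dr dc pl_sign k := rfl
  rw [hcomp, takeWhile_range_eq]

-- a matching cell lies on a valid row of the matrix
lemma cell_matches_row_bounds (matrix : List (List String)) (r c : Int) (p : String)
    (h : cell_matches matrix r c p = true) : 0 ≤ r ∧ r < (matrix.length : Int) := by
  rw [cell_matches] at h
  by_cases hneg : c < 0 || r < 0
  · rw [if_pos hneg] at h; exact absurd h (by simp)
  · rw [if_neg hneg] at h
    simp only [Bool.or_eq_true, decide_eq_true_eq, not_or, not_lt] at hneg
    cases hg : PySem.List.pyGet? matrix r with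
    | none => rw [hg] at h; exact absurd h (by simp)
    | some rw' =>
      have hin : PySem.Raise.InRange matrix.length r := by
        by_contra hno
        rw [← PySem.List.pyGet?_eq_none_iff (xs := matrix)] at hno
        rw [hg] at hno
        exact Option.some_ne_none rw' hno
      simp only [PySem.Raise.InRange] at hin
      exact ⟨hneg.2, by omega⟩

-- the sliding-window existential equals the run-length threshold test
lemma window_char (Q : Int → Bool) (w : Nat) (_hw : 1 ≤ w) :
    ((List.range w).any (fun s => (List.range w).all (fun j => Q ((s : Int) - (j : Int)))))
      = decide ((pvRun (fun k : Nat => Q (k : Int)) w : Int)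
          + (pvRun (fun k : Nat => Q (-(k : Int))) w : Int) - 1 ≥ (w : Int)) := by
  set u := pvRun (fun k : Nat => Q (k : Int)) w with hu
  set d := pvRun (fun k : Nat => Q (-(k : Int))) w with hd
  have hu_le := pvRun_le (fun k : Nat => Q (k : Int)) w
  have hd_le := pvRun_le (fun k : Nat => Q (-(k : Int))) w
  rw [Bool.eq_iff_iff, List.any_eq_true, decide_eq_true_iff]
  constructor
  · rintro ⟨s, hs, hall⟩
    have hs' := List.mem_range.mp hs
    rw [List.all_eq_true] at hall
    have hQ : ∀ j : Nat, j < w → Q ((s : Int) - j) = true := fun j hj =>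
      hall j (List.mem_range.mpr hj)
    -- u ≥ s + 1
    have hu_ge : s + 1 ≤ u := by
      by_contra hlt
      have h1 : u < w := by omega
      have := pvRun_stop (fun k : Nat => Q (k : Int)) w h1
      have h2 : Q ((s : Int) - (s - u : Nat)) = true := hQ (s - u) (by omega)
      have h3 : ((s : Int) - (s - u : Nat)) = (u : Int) := by omega
      rw [h3] at h2
      rw [← hu] at this
      simp [this] at h2
    -- d ≥ w - s
    have hd_ge : w - s ≤ d := by
      by_contra hlt
      have h1 : d < w := by omega
      have := pvRun_stop (fun k : Nat => Q (-(k : Int))) w h1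
      have h2 : Q ((s : Int) - (s + d : Nat)) = true := hQ (s + d) (by omega)
      have h3 : ((s : Int) - (s + d : Nat)) = -(d : Int) := by push_cast; omega
      rw [h3] at h2
      rw [← hd] at this
      simp [this] at h2
    omega
  · intro hsum
    -- u ≥ 1 (else u = d = 0 since Q 0 decides both, contradicting the sum)
    have hu1 : 1 ≤ u := by
      by_contra h0
      have hu0 : u = 0 := by omega
      have hd0 : d = 0 := by
        by_contra hd0
        have hq0 : Q (((0:Nat) : Int)) = true := by
          have := pvRun_holds (fun k : Nat => Q (-(k : Int))) w (k := 0) (by omega)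
          simpa using this
        have := pvRun_stop (fun k : Nat => Q (k : Int)) w (by omega)
        rw [← hu, hu0] at this
        simp at this hq0
        rw [hq0] at this
        exact absurd this (by simp)
      omega
    refine ⟨u - 1, List.mem_range.mpr (by omega), ?_⟩
    rw [List.all_eq_true]
    intro j hj
    have hj' := List.mem_range.mp hj
    have ht : ((u - 1 : Nat) : Int) - (j : Int) = (u : Int) - 1 - j := by push_cast [hu1]; ring
    rw [ht]
    by_cases hcase : (j : Int) ≤ (u : Int) - 1
    · -- nonnegative offset: inside the up run
      obtain ⟨k, hk, hkeq⟩ : ∃ k : Nat, k < u ∧ ((u : Int) - 1 - j) = (k : Int) :=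
        ⟨u - 1 - j, by omega, by omega⟩
      rw [hkeq]
      exact pvRun_holds (fun k : Nat => Q (k : Int)) w hk
    · -- negative offset: inside the down run
      rw [not_le] at hcase
      obtain ⟨k, hk, hkeq⟩ : ∃ k : Nat, k < d ∧ ((u : Int) - 1 - j) = -(k : Int) :=
        ⟨j + 1 - u, by omega, by omega⟩
      rw [hkeq]
      exact pvRun_holds (fun k : Nat => Q (-(k : Int))) w hk

-- ===== VERDICT (by name: the statement is the Claim_ definition above) =====
theorem ascending_diagonal_spec : Claim_equal_ascending_diagonal := by
  intro matrix row col pl_sign win_num _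
  show ascending_diagonal matrix row col pl_sign win_num
      = ascending_diagonal_alt matrix row col pl_sign win_num
  by_cases hw0 : win_num ≤ 0
  · -- range(win_num) is empty: A's set stays empty, len 0 ≥ win_num holds; B returns True
    have hw : win_num.toNat = 0 := by omega
    rw [ascending_diagonal_alt, if_pos hw0]
    simp only [ascending_diagonal, hw, pvLoopA]
    have hlen : PySem.Set.len (PySem.Set.empty : PySem.Set (Int × Int)) = 0 := by
      simp [PySem.Set.len, PySem.Set.empty]
    rw [hlen]
    exact decide_eq_true (by omega)
  · have hwpos : 0 < win_num := by omega
    have hwcast : ((win_num.toNat : Int)) = win_num := Int.toNat_of_nonneg (by omega)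
    set q1 : Nat → Bool := fun k : Nat => pvQ matrix row col (-1) 1 pl_sign k with hq1def
    set q2 : Nat → Bool := fun k : Nat => pvQ matrix row col 1 (-1) pl_sign k with hq2def
    set w : Nat := win_num.toNat with hwdef
    have hw1 : 1 ≤ w := by omega
    set u := pvRun q1 w with hudef
    set d := pvRun q2 w with hddef
    have hu_le : u ≤ w := by rw [hudef]; exact pvRun_le q1 w
    have hd_le : d ≤ w := by rw [hddef]; exact pvRun_le q2 w
    have hq10 : q1 0 = cell_matches matrix row col pl_sign := by
      rw [hq1def]; simp [pvQ]
    have hq20 : q2 0 = cell_matches matrix row col pl_sign := by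
      rw [hq2def]; simp [pvQ]
    -- ===== A's side: the set's size is u + d - 1 (center match) or 0 =====
    have hs1 := loop_result matrix row col (-1) 1 pl_sign win_num PySem.Set.empty
        (fun i => (row - i, col + i))
        (by intro k; simp only [pvPt]; congr 1 <;> ring)
    have hs2 := loop_result matrix row col 1 (-1) pl_sign win_num
        (pvLoopA matrix pl_sign (fun i => (row - i, col + i)) win_num.toNat 0 PySem.Set.empty)
        (fun i => (row + i, col - i))
        (by intro k; simp only [pvPt]; congr 1 <;> ring)
    have hs1' : pvLoopA matrix pl_sign (fun i => (row - i, col + i)) win_num.toNat 0 PySem.Set.empty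
        = (List.range u).map (pvPt row col (-1) 1) := by
      rw [hs1, set_foldl_add_disjoint _ _
        ((List.nodup_range).map (pvPt_inj row col (-1) 1 (Or.inr rfl)))
        (by intro x _ hx; simp [PySem.Set.empty] at hx)]
      show PySem.Set.empty ++ _ = _
      simp only [PySem.Set.empty, List.nil_append]
      rfl
    rw [hs1'] at hs2
    have hA : ascending_diagonal matrix row col pl_sign win_num
        = decide ((u : Int) + (d : Int) - 1 ≥ win_num) := by
      show decide _ = _
      rw [hs1', hs2]
      rw [show pvRun (fun k : Nat => pvQ matrix row col 1 (-1) pl_sign (k : Int)) win_num.toNat = d from rfl]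
      by_cases hc : cell_matches matrix row col pl_sign
      · -- center matches: u ≥ 1 and d ≥ 1, shared center cell deduplicated
        have hu1 : 1 ≤ u := by
          by_contra h0
          have hst := pvRun_stop q1 w (by omega)
          rw [← hudef] at hst
          have hux : u = 0 := by omega
          rw [hux, hq10] at hst
          simp [hc] at hst
        have hd1 : 1 ≤ d := by
          by_contra h0
          have hst := pvRun_stop q2 w (by omega)
          rw [← hddef] at hst
          have hdx : d = 0 := by omega
          rw [hdx, hq20] at hst
          simp [hc] at hst
        obtain ⟨d', hd'⟩ : ∃ d', d = d' + 1 := ⟨d - 1, by omega⟩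
        rw [hd']
        have hsplit : (List.range (d' + 1)).map (pvPt row col 1 (-1))
            = pvPt row col 1 (-1) 0 :: (List.range d').map (fun t => pvPt row col 1 (-1) (t+1)) := by
          rw [List.range_succ_eq_map, List.map_cons, List.map_map]
          rfl
        rw [hsplit, List.foldl_cons]
        have hmem : pvPt row col 1 (-1) 0 ∈ (List.range u).map (pvPt row col (-1) 1) := by
          refine List.mem_map.mpr ⟨0, List.mem_range.mpr (by omega), ?_⟩
          simp [pvPt]
        rw [set_add_mem hmem]
        rw [set_foldl_add_disjoint _ _ ?nodup ?disj]
        case nodup =>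
          refine List.Nodup.map ?_ List.nodup_range
          intro a b hab
          have h2 := pvPt_inj row col 1 (-1) (Or.inl rfl) hab
          omega
        case disj =>
          intro x hx hx1
          obtain ⟨t, _, rfl⟩ := List.mem_map.mp hx
          obtain ⟨k, _, hk⟩ := List.mem_map.mp hx1
          simp only [pvPt, Prod.mk.injEq, neg_one_mul, one_mul] at hk
          omega
        simp only [PySem.Set.len, List.length_append, List.length_map, List.length_range]
        rw [decide_eq_decide]
        push_cast
        omega
      · -- center does not match: both runs are empty
        have hu0 : u = 0 := by
          by_contra h0
          have := pvRun_holds q1 w (k := 0) (by omega)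
          rw [hq10] at this
          exact hc this
        have hd0 : d = 0 := by
          by_contra h0
          have := pvRun_holds q2 w (k := 0) (by omega)
          rw [hq20] at this
          exact hc this
        rw [hu0, hd0]
        have h0 : (List.foldl PySem.Set.add ((List.range 0).map (pvPt row col (-1) 1))
            ((List.range 0).map (pvPt row col 1 (-1)))).len = (0 : Int) := rfl
        rw [Bool.eq_iff_iff, decide_eq_true_iff, decide_eq_true_iff, h0]
        omega
    by_cases hbig : (matrix.length : Int) < win_num
    · -- too few rows for any window: A's run sum cannot reach win_num either
      rw [hA, ascending_diagonal_alt, if_neg hw0, if_pos hbig]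
      apply decide_eq_false
      by_cases hc : cell_matches matrix row col pl_sign
      · have hu1 : 1 ≤ u := by
          by_contra h0
          have hst := pvRun_stop q1 w (by omega)
          rw [← hudef] at hst
          have hux : u = 0 := by omega
          rw [hux, hq10] at hst
          simp [hc] at hst
        have hd1 : 1 ≤ d := by
          by_contra h0
          have hst := pvRun_stop q2 w (by omega)
          rw [← hddef] at hst
          have hdx : d = 0 := by omega
          rw [hdx, hq20] at hst
          simp [hc] at hst
        have hq1u : q1 (u - 1) = true := pvRun_holds q1 w (by omega)
        have hq2d : q2 (d - 1) = true := pvRun_holds q2 w (by omega)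
        rw [hq1def] at hq1u
        rw [hq2def] at hq2d
        have hb1 := cell_matches_row_bounds matrix _ _ pl_sign hq1u
        have hb2 := cell_matches_row_bounds matrix _ _ pl_sign hq2d
        have hcast1 : ((u - 1 : Nat) : Int) = (u : Int) - 1 := by omega
        have hcast2 : ((d - 1 : Nat) : Int) = (d : Int) - 1 := by omega
        rw [hcast1] at hb1
        rw [hcast2] at hb2
        omega
      · have hu0 : u = 0 := by
          by_contra h0
          have := pvRun_holds q1 w (k := 0) (by omega)
          rw [hq10] at this
          exact hc this
        have hd0 : d = 0 := by
          by_contra h0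
          have := pvRun_holds q2 w (k := 0) (by omega)
          rw [hq20] at this
          exact hc this
        omega
    -- ===== B's side: the sliding-window existential equals the same threshold test =====
    have hB : ascending_diagonal_alt matrix row col pl_sign win_num
        = decide ((u : Int) + (d : Int) - 1 ≥ win_num) := by
      rw [ascending_diagonal_alt, if_neg hw0, if_neg hbig]
      have hwin := window_char (fun t => cell_matches matrix (row - t) (col + t) pl_sign) w hw1
      have e1 : pvRun (fun k : Nat => cell_matches matrix (row - (k : Int)) (col + (k : Int)) pl_sign) w = u := by
        rw [hudef, hq1def]
        congr 1
        funext k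
        simp only [pvQ]
        congr 1 <;> ring
      have e2 : pvRun (fun k : Nat => cell_matches matrix (row - (-(k : Int))) (col + (-(k : Int))) pl_sign) w = d := by
        rw [hddef, hq2def]
        congr 1
        funext k
        simp only [pvQ]
        congr 1 <;> ring
      rw [show ((List.range w).any (fun s =>
            (List.range w).all (fun j =>
              cell_matches matrix (row - ((s : Int) - (j : Int))) (col + ((s : Int) - (j : Int))) pl_sign)))
          = ((List.range w).any (fun s => (List.range w).all (fun j =>
              (fun t => cell_matches matrix (row - t) (col + t) pl_sign) ((s : Int) - (j : Int))))) from rfl]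
      rw [hwin, e1, e2, hwcast]
    rw [hA, hB]
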